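-- pv_equiv track=rewrite | github.com/endomorphosis/ipfs_datasets_py | ipfs_datasets_py/caselaw_graphrag.py | _get_year_range
-- ===== SOURCE A (Python) =====
-- from typing import Dict, List, Any, Optional, Tuple, Set
--
-- def _get_year_range(cases: List[Dict[str, Any]]) -> Dict[str, int]:
--     """Get year range of cases"""
--     years = [case.get('year', 0) for case in cases if case.get('year')]
--     if years:
--         return {
--             'min_year': min(years),
--             'max_year': max(years),
--             'span': max(years) - min(years)
--         }
--     return {'min_year': 0, 'max_year': 0, 'span': 0}
-- ===== SOURCE B (Python) =====
-- def _get_year_range(cases):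
--     """Get year range of cases: one pass keeping running min/max."""
--     min_year = None
--     max_year = None
--     for case in cases:
--         y = case.get('year')
--         if y:
--             if min_year is None:
--                 min_year = y
--                 max_year = y
--             else:
--                 min_year = min(min_year, y)
--                 max_year = max(max_year, y)
--     if min_year is None:
--         return {'min_year': 0, 'max_year': 0, 'span': 0}
--     return {'min_year': min_year, 'max_year': max_year, 'span': max_year - min_year}
-- ===== Notes on version B (the rewrite author's own statement) =====
-- stated objective: simpler
-- what changed: Replaces the filtered intermediate list plus three separate min/max scans with a single pass over cases that maintains running min_year/max_year (None until the first truthy year).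
import Mathlib
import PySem

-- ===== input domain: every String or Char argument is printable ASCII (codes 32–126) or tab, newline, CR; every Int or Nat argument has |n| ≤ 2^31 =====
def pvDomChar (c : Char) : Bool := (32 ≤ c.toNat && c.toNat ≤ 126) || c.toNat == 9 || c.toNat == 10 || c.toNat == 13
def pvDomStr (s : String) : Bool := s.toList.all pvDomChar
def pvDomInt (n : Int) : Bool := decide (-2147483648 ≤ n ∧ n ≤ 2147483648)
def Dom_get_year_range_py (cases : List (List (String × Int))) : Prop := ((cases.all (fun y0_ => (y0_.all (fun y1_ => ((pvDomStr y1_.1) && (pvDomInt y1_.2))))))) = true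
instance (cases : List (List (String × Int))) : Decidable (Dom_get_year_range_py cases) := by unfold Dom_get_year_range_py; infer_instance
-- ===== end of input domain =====

-- ===== PORT A =====
-- B differs from A only in decomposition: one running-min/max pass instead of a filtered list scanned by min and max.
-- dict lookup case.get('year') = first match in the association list (Python dict convention of this file)
def pyGetYear (c : List (String × Int)) : Option Int :=
  (c.find? (fun p => p.1 == "year")).map (fun p => p.2)

def get_year_range_py (cases : List (List (String × Int))) : List (String × Int) :=
  -- years = [case.get('year', 0) for case in cases if case.get('year')]
  let years := (cases.filter (fun c => (pyGetYear c).getD 0 != 0)).map (fun c => (pyGetYear c).getD 0)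
  match PySem.List.min? years (fun y => y), PySem.List.max? years (fun y => y) with
  | some mn, some mx => [("min_year", mn), ("max_year", mx), ("span", mx - mn)]
  | _, _ => [("min_year", 0), ("max_year", 0), ("span", 0)]

-- ===== PORT B =====
-- the body of B's loop: y = case.get('year'); if y: update running (min, max)
def stepB (acc : Option (Int × Int)) (c : List (String × Int)) : Option (Int × Int) :=
  match pyGetYear c with
  | none => acc
  | some y =>
    if y = 0 then acc
    else
      match acc with
      | none => some (y, y)
      | some (mn, mx) => some (min mn y, max mx y)

def get_year_range_py_alt (cases : List (List (String × Int))) : List (String × Int) :=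
  let st := cases.foldl stepB none
  match st with
  | none => [("min_year", 0), ("max_year", 0), ("span", 0)]
  | some (mn, mx) => [("min_year", mn), ("max_year", mx), ("span", mx - mn)]

-- ===== PRECONDITION & SPEC =====
def Spec_get_year_range_py (cases : List (List (String × Int))) (out : List (String × Int)) : Prop := out = get_year_range_py_alt cases
instance (cases : List (List (String × Int))) (out : List (String × Int)) : Decidable (Spec_get_year_range_py cases out) := by unfold Spec_get_year_range_py; infer_instance

-- ===== CLAIM (what is proved, stated in full; the proofs are below) =====
def Claim_equal_get_year_range_py : Prop := ∀ (cases : List (List (String × Int))), Dom_get_year_range_py cases → Spec_get_year_range_py cases (get_year_range_py cases)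

-- ===== LEMMAS AND PROOFS =====

def step2 (acc : Option (Int × Int)) (y : Int) : Option (Int × Int) :=
  match acc with
  | none => some (y, y)
  | some (mn, mx) => some (min mn y, max mx y)

lemma foldB_eq_foldl_years (cases : List (List (String × Int))) (acc : Option (Int × Int)) :
    cases.foldl stepB acc =
      ((cases.filter (fun c => (pyGetYear c).getD 0 != 0)).map (fun c => (pyGetYear c).getD 0)).foldl step2 acc := by
  induction cases generalizing acc with
  | nil => rfl
  | cons c t ih =>
    have hstep : stepB acc c =
        if ((pyGetYear c).getD 0 != 0) then step2 acc ((pyGetYear c).getD 0) else acc := by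
      cases h : pyGetYear c with
      | none => simp [stepB, h]
      | some y =>
        by_cases hy : y = 0 <;> simp [stepB, step2, h, hy]
    by_cases hc : ((pyGetYear c).getD 0 != 0) = true
    · simp only [List.foldl_cons, List.filter_cons, hc, if_true, List.map_cons, hstep, ih]
    · simp only [List.foldl_cons, List.filter_cons, hc, if_false, hstep, ih, Bool.false_eq_true]

lemma foldl_step2_some (ys : List Int) (m M : Int) :
    ys.foldl step2 (some (m, M)) = some (ys.foldl min m, ys.foldl max M) := by
  induction ys generalizing m M with
  | nil => rfl
  | cons y t ih => simp [step2, ih]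

lemma foldl_step2_none (y : Int) (t : List Int) :
    (y :: t).foldl step2 none = some (t.foldl min y, t.foldl max y) := by
  simp [step2, foldl_step2_some]

-- ===== VERDICT (by name: the statement is the Claim_ definition above) =====
theorem get_year_range_py_spec : Claim_equal_get_year_range_py := by
  intro cases _
  unfold Spec_get_year_range_py get_year_range_py get_year_range_py_alt
  have hfold := foldB_eq_foldl_years cases none
  rw [hfold]
  cases hys : (cases.filter (fun c => (pyGetYear c).getD 0 != 0)).map (fun c => (pyGetYear c).getD 0) with
  | nil => simp [PySem.List.min?, PySem.List.max?]
  | cons y t =>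
    rw [foldl_step2_none]
    simp only [PySem.List.min?_id_cons, PySem.List.max?_id_cons]
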